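-- pv_equiv track=rewrite | github.com/horsewithnoname1985/codility_test_bmw | test_apple_trees.py | get_apple_count_by_start_position
-- ===== SOURCE A (Python) =====
-- def get_apple_count_by_start_position(apple_count, trees):
--
--     total_trees = len(apple_count)
--     possible_count = []
--
--     start_position = 0
--     for i in range(start_position, total_trees - trees):
--
--         apples = 0
--         for j in range(i, i + trees):
--             apples += apple_count[j + start_position]
--
--         possible_count.append(apples)
--
--     return possible_count
-- ===== SOURCE B (Python) =====
-- def get_apple_count_by_start_position(apple_count, trees):
--     prefix = [0]
--     for x in apple_count:
--         prefix.append(prefix[-1] + x)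
--     return [prefix[i + trees] - prefix[i]
--             for i in range(len(apple_count) - trees)]
-- ===== Notes on version B (the rewrite author's own statement) =====
-- stated objective: faster
-- what changed: Replaced the nested re-summation of each window by a prefix-sum array built in one pass, so each window sum is one subtraction.
-- outside the precondition, e.g. on get_apple_count_by_start_position([1, 2], -1): A returns [0, 0, 0], B returns [3, -1, -2]
import Mathlib
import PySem

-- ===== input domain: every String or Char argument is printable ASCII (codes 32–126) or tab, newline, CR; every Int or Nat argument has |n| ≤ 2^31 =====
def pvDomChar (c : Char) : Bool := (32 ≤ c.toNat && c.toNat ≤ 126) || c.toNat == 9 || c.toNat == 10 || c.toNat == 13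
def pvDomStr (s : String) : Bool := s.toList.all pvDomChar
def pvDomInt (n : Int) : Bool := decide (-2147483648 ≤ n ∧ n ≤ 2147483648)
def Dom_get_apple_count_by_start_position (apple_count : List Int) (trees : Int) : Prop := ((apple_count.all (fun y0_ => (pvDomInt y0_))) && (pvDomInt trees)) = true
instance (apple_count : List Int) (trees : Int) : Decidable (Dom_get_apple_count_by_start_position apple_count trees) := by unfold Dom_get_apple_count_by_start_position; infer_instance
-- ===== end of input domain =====

-- B replaces A's nested re-summation of each window by a one-pass prefix-sum array (one subtraction per window); objective: faster.

-- ===== PORT A =====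
-- Literal transliteration of A: outer loop over range(0, total_trees - trees),
-- inner loop re-sums apple_count[j + start_position] (start_position = 0).
-- Indexing uses pyGetD with default 0; inside Pre_ every accessed index is in range.
-- possible_count.append(apples) is encoded as cons + one final reverse (the standard
-- linear-time encoding of an append loop; same iterations, same values, same order).
def get_apple_count_by_start_position (apple_count : List Int) (trees : Int) : List Int :=
  let total_trees : Int := apple_count.length
  let start_position : Int := 0
  ((PySem.List.pyRange start_position (total_trees - trees) 1).foldl
    (fun possible_count i =>
      let apples := (PySem.List.pyRange i (i + trees) 1).foldl
        (fun apples j => apples + PySem.List.pyGetD apple_count (j + start_position) 0) 0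
      apples :: possible_count) []).reverse

-- ===== PORT B =====
-- Literal transliteration of Source B: build prefix sums with prefix.append(prefix[-1] + x),
-- then one subtraction per window via a comprehension over range(len - trees).
def get_apple_count_by_start_position_alt (apple_count : List Int) (trees : Int) : List Int :=
  let pfx := apple_count.foldl
    (fun pfx x => pfx ++ [PySem.List.pyGetD pfx (-1) 0 + x]) [(0 : Int)]
  (PySem.List.pyRange 0 ((apple_count.length : Int) - trees) 1).map
    (fun i => PySem.List.pyGetD pfx (i + trees) 0 - PySem.List.pyGetD pfx i 0)

-- ===== PRECONDITION & SPEC =====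
-- Pre_ restricts to the natural domain of a window width: 0 ≤ trees. For negative
-- trees (malformed input) A still returns — a list of n - trees zeros, an artefact of
-- its empty inner ranges — and B's prefix-sum differences do not match that.
def Pre_get_apple_count_by_start_position (apple_count : List Int) (trees : Int) : Prop :=
  0 ≤ trees
instance (apple_count : List Int) (trees : Int) : Decidable (Pre_get_apple_count_by_start_position apple_count trees) := by unfold Pre_get_apple_count_by_start_position; infer_instance

def pvWitness_get_apple_count_by_start_position : List Int × Int := ([1, 2, 3, 4], 2)

def Spec_get_apple_count_by_start_position (apple_count : List Int) (trees : Int) (out : List Int) : Prop := out = get_apple_count_by_start_position_alt apple_count trees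
instance (apple_count : List Int) (trees : Int) (out : List Int) : Decidable (Spec_get_apple_count_by_start_position apple_count trees out) := by unfold Spec_get_apple_count_by_start_position; infer_instance

-- ===== CLAIM (what is proved, stated in full; the proofs are below) =====
def Claim_equal_get_apple_count_by_start_position : Prop := ∀ (apple_count : List Int) (trees : Int), Dom_get_apple_count_by_start_position apple_count trees → Pre_get_apple_count_by_start_position apple_count trees → Spec_get_apple_count_by_start_position apple_count trees (get_apple_count_by_start_position apple_count trees)

-- ===== LEMMAS AND PROOFS =====

-- An append loop encoded as cons + reverse is the reversed map.
theorem pv_foldl_cons_rev {α β : Type} (f : α → β) (l : List α) : ∀ (acc : List β),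
    l.foldl (fun acc x => f x :: acc) acc = (l.map f).reverse ++ acc := by
  induction l with
  | nil => intro acc; simp
  | cons x l ih => intro acc; simp [ih]

-- The prefix loop of B builds List.scanl (·+·): each step appends last + x.
theorem pv_prefix_scanl (l : List Int) : ∀ (p0 : List Int) (s : Int),
    l.foldl (fun p x => p ++ [PySem.List.pyGetD p (-1) 0 + x]) (p0 ++ [s])
      = p0 ++ List.scanl (· + ·) s l := by
  induction l with
  | nil => intro p0 s; simp [List.scanl_nil]
  | cons x l ih =>
      intro p0 s
      simp only [List.foldl_cons, PySem.List.pyGetD_neg_one_append_singleton, List.scanl_cons]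
      rw [ih (p0 ++ [s]) (s + x)]
      simp

-- scanl of (+) from s indexes to s + sum of the first k elements.
theorem pv_scanl_getElem? (l : List Int) : ∀ (s : Int) (k : Nat), k ≤ l.length →
    (List.scanl (· + ·) s l)[k]? = some (s + (l.take k).sum) := by
  induction l with
  | nil =>
      intro s k hk
      have : k = 0 := by simpa using hk
      subst this
      simp [List.scanl_nil]
  | cons x l ih =>
      intro s k hk
      cases k with
      | zero => simp [List.scanl_cons]
      | succ k =>
          simp only [List.scanl_cons, List.getElem?_cons_succ, List.take_succ_cons,
            List.sum_cons]
          rw [ih (s + x) k (by simpa using hk)]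
          congr 1
          ring

-- Window of pyGetD over pyRange i m is the slice drop i.toNat |>.take (m-i).toNat.
theorem pv_window_map (xs : List Int) (i m : Int) (h0 : 0 ≤ i) (him : i ≤ m)
    (hm : m ≤ (xs.length : Int)) :
    (PySem.List.pyRange i m 1).map (fun j => PySem.List.pyGetD xs j 0)
      = (xs.drop i.toNat).take (m - i).toNat := by
  have hlen : (((xs.take m.toNat).length : Nat) : Int) = m := by
    simp [List.length_take]
    omega
  have hcong : (PySem.List.pyRange i m 1).map (fun j => PySem.List.pyGetD xs j 0)
      = (PySem.List.pyRange i m 1).map (fun j => PySem.List.pyGetD (xs.take m.toNat) j 0) := by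
    refine List.map_congr_left ?_
    intro j hj
    rw [PySem.List.mem_pyRange_one] at hj
    have hj0 : 0 ≤ j := le_trans h0 hj.1
    have hjlen : j < (xs.length : Int) := lt_of_lt_of_le hj.2 hm
    rw [PySem.List.pyGetD_eq_getElem xs 0 hj0 hjlen,
        PySem.List.pyGetD_eq_getElem (xs.take m.toNat) 0 hj0 (by rw [hlen]; exact hj.2)]
    simp [List.getElem_take]
  have h2 := PySem.List.map_pyGetD_pyRange (xs.take m.toNat) (0 : Int) h0
  simp only [PySem.List.len_eq] at h2
  rw [hlen] at h2
  rw [hcong, h2, List.drop_take]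
  congr 1
  omega

-- A's inner loop equals B's prefix difference, pointwise on the shared range.
theorem pv_pointwise (xs : List Int) (trees : Int) (ht : 0 ≤ trees) (i : Int)
    (h0 : 0 ≤ i) (hi : i < (xs.length : Int) - trees) :
    ((PySem.List.pyRange i (i + trees) 1).foldl
        (fun apples j => apples + PySem.List.pyGetD xs (j + 0) 0) 0)
      = PySem.List.pyGetD (List.scanl (· + ·) 0 xs) (i + trees) 0
        - PySem.List.pyGetD (List.scanl (· + ·) 0 xs) i 0 := by
  have hlen : ((List.scanl (· + ·) (0 : Int) xs).length : Int) = (xs.length : Int) + 1 := by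
    simp [List.length_scanl]
  have hia : i + trees ≤ (xs.length : Int) := by omega
  have e1 : PySem.List.pyGetD (List.scanl (· + ·) 0 xs) (i + trees) 0
      = (xs.take (i + trees).toNat).sum := by
    rw [PySem.List.pyGetD_eq_getElem _ 0 (by omega) (by omega)]
    have h := pv_scanl_getElem? xs 0 (i + trees).toNat (by omega)
    obtain ⟨_, he⟩ := List.getElem?_eq_some_iff.mp h
    simpa using he
  have e2 : PySem.List.pyGetD (List.scanl (· + ·) 0 xs) i 0 = (xs.take i.toNat).sum := by
    rw [PySem.List.pyGetD_eq_getElem _ 0 h0 (by omega)]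
    have h := pv_scanl_getElem? xs 0 i.toNat (by omega)
    obtain ⟨_, he⟩ := List.getElem?_eq_some_iff.mp h
    simpa using he
  rw [e1, e2]
  have htake : (i + trees).toNat = i.toNat + trees.toNat := by omega
  rw [htake, List.take_add, List.sum_append]
  have hfold : ((PySem.List.pyRange i (i + trees) 1).foldl
      (fun apples j => apples + PySem.List.pyGetD xs (j + 0) 0) 0)
      = 0 + ((PySem.List.pyRange i (i + trees) 1).map (fun j => PySem.List.pyGetD xs j 0)).sum := by
    simp only [add_zero]
    exact PySem.List.foldl_add _ _ _
  rw [hfold, pv_window_map xs i (i + trees) h0 (by omega) hia]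
  have hto : (i + trees - i).toNat = trees.toNat := by omega
  rw [hto]
  ring

-- ===== VERDICT (by name: the statement is the Claim_ definition above) =====
theorem get_apple_count_by_start_position_spec : Claim_equal_get_apple_count_by_start_position := by
  intro apple_count trees _ hpre
  unfold Spec_get_apple_count_by_start_position
  unfold get_apple_count_by_start_position get_apple_count_by_start_position_alt
  have hpref : apple_count.foldl
      (fun pfx x => pfx ++ [PySem.List.pyGetD pfx (-1) 0 + x]) [(0 : Int)]
      = List.scanl (· + ·) 0 apple_count := by
    simpa using pv_prefix_scanl apple_count [] 0
  simp only [hpref, pv_foldl_cons_rev, List.append_nil, List.reverse_reverse]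
  refine List.map_congr_left ?_
  intro i hi
  rw [PySem.List.mem_pyRange_one] at hi
  exact pv_pointwise apple_count trees hpre i hi.1 hi.2
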